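-- pv_equiv track=rewrite | github.com/ravatez/GFG-POTD | Medium/Sum of Products/sum-of-products.py | pairAndSum
-- ===== SOURCE A (Python) =====
-- def pairAndSum(n, arr):
--     #code here
--     total_sum = 0
--
--     for bit_pos in range(32):
--         count = 0
--         for num in arr:
--             if num & (1 << bit_pos):
--                 count += 1
--         total_sum += (count * (count - 1) // 2) * (1 << bit_pos)
--
--     return total_sum
-- ===== SOURCE B (Python) =====
-- def pairAndSum(n, arr):
--     # Direct sum over unordered pairs of (x & y) truncated to the 32 bit
--     # positions A inspects; alternative decomposition, not faster.
--     total = 0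
--     rest = list(arr)
--     while rest:
--         x, rest = rest[0], rest[1:]
--         for y in rest:
--             total += (x & y) & 0xFFFFFFFF
--     return total
-- ===== Notes on version B (the rewrite author's own statement) =====
-- stated objective: alternative
-- what changed: A counts, for each of the 32 bit positions, how many elements have that bit set and sums C(count,2)*2^bit; B instead sums (x & y) & 0xFFFFFFFF directly over all unordered pairs of elements.
import Mathlib
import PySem

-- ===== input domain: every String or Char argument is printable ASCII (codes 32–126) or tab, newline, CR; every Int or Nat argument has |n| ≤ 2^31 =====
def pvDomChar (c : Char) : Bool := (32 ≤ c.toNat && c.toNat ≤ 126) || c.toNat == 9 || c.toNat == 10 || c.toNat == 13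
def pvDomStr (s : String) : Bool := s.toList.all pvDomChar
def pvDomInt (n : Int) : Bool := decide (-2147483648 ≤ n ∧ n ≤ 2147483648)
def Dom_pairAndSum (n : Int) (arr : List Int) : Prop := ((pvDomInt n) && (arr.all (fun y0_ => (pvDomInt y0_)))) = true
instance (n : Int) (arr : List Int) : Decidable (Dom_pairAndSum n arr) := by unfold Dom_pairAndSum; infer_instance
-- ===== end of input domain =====

-- B replaces A's per-bit-position popcount-and-binomial pass by a direct sum over all
-- unordered pairs of (x & y) & 0xFFFFFFFF — an alternative decomposition, not faster.

-- ===== PORT A =====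
def pairAndSum (n : Int) (arr : List Int) : Int :=
  (PySem.List.pyRange 0 32 1).foldl (fun total_sum bit_pos =>
    let count : Int := arr.foldl (fun count num =>
      if PySem.Int.band num ((1 : Int) <<< bit_pos.toNat) ≠ 0 then count + 1 else count) 0
    total_sum + PySem.Int.floordiv (count * (count - 1)) 2 * ((1 : Int) <<< bit_pos.toNat)) 0

-- ===== PORT B =====
-- while rest: x, rest = rest[0], rest[1:]; for y in rest: total += (x & y) & 0xFFFFFFFF
def pairAndSumAltGo (total : Int) (rest : List Int) : Int :=
  match rest with
  | [] => total
  | x :: rest =>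
    pairAndSumAltGo
      (rest.foldl (fun t y => t + PySem.Int.band (PySem.Int.band x y) 4294967295) total) rest

def pairAndSum_alt (n : Int) (arr : List Int) : Int :=
  pairAndSumAltGo 0 arr

-- ===== PRECONDITION & SPEC =====
def Spec_pairAndSum (n : Int) (arr : List Int) (out : Int) : Prop := out = pairAndSum_alt n arr
instance (n : Int) (arr : List Int) (out : Int) : Decidable (Spec_pairAndSum n arr out) := by unfold Spec_pairAndSum; infer_instance

-- ===== CLAIM (what is proved, stated in full; the proofs are below) =====
def Claim_equal_pairAndSum : Prop := ∀ (n : Int) (arr : List Int), Dom_pairAndSum n arr → Spec_pairAndSum n arr (pairAndSum n arr)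

-- ===== LEMMAS AND PROOFS =====

-- ---- generic bit arithmetic ----

theorem pvXorDisjointAdd : ∀ a b : Nat, a &&& b = 0 → a ^^^ b = a + b := by
  intro a
  induction a using Nat.binaryRec with
  | zero => intro b h; simp
  | bit c m ih =>
    intro b h
    rw [← Nat.bit_bodd_div2 b] at h ⊢
    rw [Nat.land_bit] at h
    rw [Nat.xor_bit]
    rw [Nat.bit_eq_zero_iff] at h
    rw [ih _ h.1]
    rcases h with ⟨-, h2⟩
    cases c <;> cases hb : b.bodd <;> simp [hb, Nat.bit] at h2 ⊢ <;> omega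

theorem pvLdiffEq (a b : Nat) : Nat.ldiff a b = a - (a &&& b) := by
  have hx : Nat.ldiff a b ^^^ (a &&& b) = a := by
    apply Nat.eq_of_testBit_eq
    intro i
    simp [Nat.testBit_ldiff, Nat.testBit_and]
    cases a.testBit i <;> cases b.testBit i <;> simp
  have hd : Nat.ldiff a b &&& (a &&& b) = 0 := by
    apply Nat.eq_of_testBit_eq
    intro i
    simp [Nat.testBit_ldiff, Nat.testBit_and]
    cases a.testBit i <;> cases b.testBit i <;> simp
  have := pvXorDisjointAdd _ _ hd
  omega

-- PySem's Python-exact bitwise-and is Mathlib's Int.land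
theorem pvBandEqLand (a b : Int) : PySem.Int.band a b = Int.land a b := by
  unfold PySem.Int.band Int.land
  rcases a with a | a <;> rcases b with b | b <;>
    simp [Int.toNat, Int.negSucc_eq, pvLdiffEq] <;> omega

theorem pvModBitSum (a : Nat) : ∀ k : Nat,
    ((a % 2 ^ k : Nat) : Int) = ∑ b ∈ Finset.range k, cond (a.testBit b) ((2 : Int) ^ b) 0 := by
  intro k
  induction k with
  | zero => simp
  | succ k ih =>
    rw [Finset.sum_range_succ, ← ih, Nat.mod_pow_succ, Nat.testBit_eq_decide_div_mod_eq]
    have : a / 2 ^ k % 2 = 0 ∨ a / 2 ^ k % 2 = 1 := by omega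
    rcases this with h | h <;> simp [h]

theorem pvGeom : ∀ k : Nat, (∑ b ∈ Finset.range k, (2 : Int) ^ b) = 2 ^ k - 1 := by
  intro k
  induction k with
  | zero => simp
  | succ k ih => rw [Finset.sum_range_succ, ih]; ring

-- the low k bits of any Int, as a sum over bit positions
theorem pvMaskSum (z : Int) (k : Nat) :
    Int.land z ((2 : Int) ^ k - 1) = ∑ b ∈ Finset.range k, cond (z.testBit b) ((2 : Int) ^ b) 0 := by
  have hc : ((2 : Int) ^ k - 1) = ((2 ^ k - 1 : Nat) : Int) := by
    have : (1:Nat) ≤ 2 ^ k := Nat.one_le_two_pow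
    push_cast [this]; ring
  rcases z with a | a
  · rw [hc]
    show ((a &&& (2 ^ k - 1) : Nat) : Int) = _
    rw [Nat.and_two_pow_sub_one_eq_mod, pvModBitSum]
    simp [Int.testBit]
  · rw [hc]
    show ((Nat.ldiff (2 ^ k - 1) a : Nat) : Int) = _
    rw [pvLdiffEq]
    have hle : (2 ^ k - 1) &&& a ≤ 2 ^ k - 1 := Nat.and_le_left
    have hand : (2 ^ k - 1) &&& a = a % 2 ^ k := by
      rw [Nat.land_comm, Nat.and_two_pow_sub_one_eq_mod]
    have h1 : (1:Nat) ≤ 2 ^ k := Nat.one_le_two_pow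
    have : ((2 ^ k - 1 - ((2 ^ k - 1) &&& a) : Nat) : Int)
        = (2 ^ k - 1 : Int) - ((a % 2 ^ k : Nat) : Int) := by
      rw [hand] at hle ⊢; push_cast [Nat.sub_sub_eq_min, hle, h1]; omega
    rw [this, pvModBitSum]
    have : ∀ b ∈ Finset.range k, cond ((Int.negSucc a).testBit b) ((2 : Int) ^ b) 0
        = (2 : Int) ^ b - cond (a.testBit b) ((2 : Int) ^ b) 0 := by
      intro b _
      simp only [Int.testBit]
      cases a.testBit b <;> simp
    rw [Finset.sum_congr rfl this, Finset.sum_sub_distrib, pvGeom]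

theorem pvLandTwoPow (z : Int) (b : Nat) :
    Int.land z ((2 : Int) ^ b) = cond (z.testBit b) ((2 : Int) ^ b) 0 := by
  have hc : ((2 : Int) ^ b) = ((2 ^ b : Nat) : Int) := by push_cast; ring
  rcases z with a | a
  · rw [hc]
    show ((a &&& 2 ^ b : Nat) : Int) = _
    rw [Nat.and_two_pow a b]
    simp [Int.testBit]
    cases a.testBit b <;> simp
  · rw [hc]
    show ((Nat.ldiff (2 ^ b) a : Nat) : Int) = _
    have : Nat.ldiff (2 ^ b) a = (!a.testBit b).toNat * 2 ^ b := by
      apply Nat.eq_of_testBit_eq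
      intro i
      rw [Nat.testBit_ldiff]
      by_cases hib : i = b
      · subst hib; cases hab : a.testBit i <;> simp [hab, Nat.testBit_two_pow]
      · cases hab : a.testBit b <;>
          simp [hab, Nat.testBit_two_pow, hib, Ne.symm hib]
    rw [this]
    simp [Int.testBit]
    cases a.testBit b <;> simp

-- A's branch condition reads bit b
theorem pvBandBitNe (z : Int) (b : Nat) :
    (PySem.Int.band z ((2 : Int) ^ b) ≠ 0) ↔ z.testBit b = true := by
  rw [pvBandEqLand, pvLandTwoPow]
  cases z.testBit b <;> simp <;> positivity

-- B's pair term, decomposed over the 32 bit positions A inspects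
theorem pvPairTerm (x y : Int) :
    PySem.Int.band (PySem.Int.band x y) 4294967295 =
      ∑ b ∈ Finset.range 32, cond (x.testBit b && y.testBit b) ((2 : Int) ^ b) 0 := by
  have hm : (4294967295 : Int) = (2 : Int) ^ 32 - 1 := by norm_num
  rw [pvBandEqLand, pvBandEqLand, hm, pvMaskSum]
  apply Finset.sum_congr rfl
  intro b _
  rw [Int.testBit_land]

-- ---- folds, sums and pair counting ----

-- sum over the unordered pairs of a list, head first
def pairS (f : Int → Int → Int) : List Int → Int
  | [] => 0
  | x :: r => ((r.map (f x)).sum) + pairS f r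

theorem pvFoldlAddSum {α : Type} (f : α → Int) : ∀ (l : List α) (t : Int),
    l.foldl (fun acc x => acc + f x) t = t + (l.map f).sum := by
  intro l
  induction l with
  | nil => simp
  | cons x r ih => intro t; simp [List.foldl_cons, ih]; ring

theorem pvFoldlCount {α : Type} (q : α → Prop) [DecidablePred q] : ∀ (l : List α) (c : Int),
    l.foldl (fun c x => if q x then c + 1 else c) c = c + (l.countP (fun x => decide (q x)) : Int) := by
  intro l
  induction l with
  | nil => simp
  | cons x r ih =>
    intro c
    by_cases h : q x <;> simp [List.countP_cons, h, ih] <;> ring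

theorem pvListRangeSum (f : Nat → Int) : ∀ k, ((List.range k).map f).sum = ∑ b ∈ Finset.range k, f b := by
  intro k
  induction k with
  | zero => simp
  | succ k ih => rw [List.range_succ, Finset.sum_range_succ, List.map_append, List.sum_append, ih]; simp

theorem pvSumSwap {α : Type} (s : Finset ℕ) (f : α → ℕ → Int) : ∀ (r : List α),
    (r.map (fun y => ∑ b ∈ s, f y b)).sum = ∑ b ∈ s, (r.map (fun y => f y b)).sum := by
  intro r
  induction r with
  | nil => simp
  | cons x r ih => simp [ih, Finset.sum_add_distrib]

theorem pvCondSum (q : Int → Bool) (v : Int) : ∀ (r : List Int),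
    (r.map (fun y => cond (q y) v 0)).sum = (r.countP q : Int) * v := by
  intro r
  induction r with
  | nil => simp
  | cons x r ih =>
    cases h : q x <;> simp [List.countP_cons, h, ih] <;> push_cast <;> ring

theorem pvTriangle (c : Nat) : (c + 1) * c / 2 = c * (c - 1) / 2 + c := by
  have he : Even (c * (c - 1)) := by
    cases c with
    | zero => simp
    | succ m => simpa [Nat.mul_comm] using Nat.even_mul_succ_self m
  have h2 : (c + 1) * c = c * (c - 1) + 2 * c := by
    cases c with
    | zero => simp
    | succ m => simp [Nat.succ_sub_one]; ring
  rcases he with ⟨e, hee⟩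
  omega

-- per-bit pair sum = binomial-style count formula
theorem pvPairBit (q : Int → Bool) (v : Int) : ∀ (l : List Int),
    pairS (fun x y => cond (q x && q y) v 0) l = ((l.countP q * (l.countP q - 1) / 2 : Nat) : Int) * v := by
  intro l
  induction l with
  | nil => simp [pairS]
  | cons x r ih =>
    rw [pairS, ih, List.countP_cons]
    cases h : q x
    · simp [h]
    · simp only [h, Bool.true_and, if_true, Nat.add_sub_cancel]
      rw [pvCondSum, pvTriangle (r.countP q)]
      push_cast
      ring

-- B's pair sum, re-ordered as a sum over bit positions
theorem pvPairSwap (l : List Int) :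
    pairS (fun x y => PySem.Int.band (PySem.Int.band x y) 4294967295) l = ∑ b ∈ Finset.range 32,
      pairS (fun x y => cond (x.testBit b && y.testBit b) ((2:Int) ^ b) 0) l := by
  induction l with
  | nil => simp only [pairS, Finset.sum_const_zero]
  | cons x r ih =>
    rw [pairS, ih]
    have : ∀ y, PySem.Int.band (PySem.Int.band x y) 4294967295
        = ∑ b ∈ Finset.range 32, cond (x.testBit b && y.testBit b) ((2:Int) ^ b) 0 :=
      fun y => pvPairTerm x y
    rw [funext this]
    rw [pvSumSwap]
    rw [← Finset.sum_add_distrib]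
    apply Finset.sum_congr rfl
    intro b _
    rw [pairS]

theorem pvAltGo : ∀ (l : List Int) (t : Int),
    pairAndSumAltGo t l = t + pairS (fun x y => PySem.Int.band (PySem.Int.band x y) 4294967295) l := by
  intro l
  induction l with
  | nil => intro t; simp [pairAndSumAltGo, pairS]
  | cons x r ih =>
    intro t
    rw [pairAndSumAltGo, ih, pairS, pvFoldlAddSum (fun y => PySem.Int.band (PySem.Int.band x y) 4294967295)]
    ring

theorem pvRangeEq : PySem.List.pyRange 0 32 1 = (List.range 32).map (fun (b : Nat) => (b : Int)) := by decide

theorem pvMulPredCast (c : Nat) : (c : Int) * ((c : Int) - 1) = ((c * (c - 1) : Nat) : Int) := by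
  cases c <;> push_cast <;> ring

-- ===== VERDICT (by name: the statement is the Claim_ definition above) =====
theorem pairAndSum_spec : Claim_equal_pairAndSum := by
  intro n arr _
  show pairAndSum n arr = pairAndSum_alt n arr
  rw [pairAndSum_alt, pvAltGo, pvPairSwap, zero_add]
  simp only [pairAndSum]
  refine Eq.trans (pvFoldlAddSum _ _ _) ?_
  rw [zero_add, pvRangeEq, List.map_map, pvListRangeSum]
  apply Finset.sum_congr rfl
  intro b _
  simp only [Function.comp]
  have hsh : ((1 : Int) <<< (((b : Int)).toNat : Int)) = (2 : Int) ^ b := by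
    rw [Int.toNat_natCast, Int.shiftLeft_eq_mul_pow]; push_cast; ring
  rw [hsh]
  have hcount : arr.foldl (fun count num =>
      if PySem.Int.band num ((2 : Int) ^ b) ≠ 0 then count + 1 else count) 0
      = ((arr.countP (fun z => z.testBit b) : Nat) : Int) := by
    rw [pvFoldlCount (fun num => PySem.Int.band num ((2 : Int) ^ b) ≠ 0) arr 0]
    have : (fun x => decide (PySem.Int.band x ((2 : Int) ^ b) ≠ 0)) = fun z => z.testBit b := by
      funext z
      rcases (pvBandBitNe z b) with ⟨h1, h2⟩
      by_cases h : PySem.Int.band z ((2 : Int) ^ b) ≠ 0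
      · simp [h, h1 h]
      · simp only [ne_eq, not_not] at h
        simp [h]
        cases hz : z.testBit b
        · rfl
        · exact absurd h (h2 hz)
    rw [this]
    ring
  rw [hcount, pvMulPredCast]
  have hfd : PySem.Int.floordiv ((arr.countP (fun z => z.testBit b) * (arr.countP (fun z => z.testBit b) - 1) : Nat) : Int) 2
      = ((arr.countP (fun z => z.testBit b) * (arr.countP (fun z => z.testBit b) - 1) / 2 : Nat) : Int) := by
    exact_mod_cast PySem.Int.floordiv_natCast _ 2
  rw [hfd, pvPairBit (fun z => z.testBit b) ((2:Int) ^ b) arr]
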